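-- pv_equiv track=rewrite | github.com/0plus1/oneyear | src/grid.py | choose_grid
-- ===== SOURCE A (Python) =====
-- import math
-- from typing import Optional, Tuple
--
-- def choose_grid(n_photos: int, reserved_cells: int) -> Tuple[int, int]:
--     needed = n_photos + reserved_cells
--     side = int(math.ceil(math.sqrt(needed)))
--
--     best = None
--     for rows in range(max(1, side - 10), side + 11):
--         for cols in range(max(1, side - 10), side + 11):
--             if rows * cols >= needed:
--                 area = rows * cols
--                 aspect_penalty = abs(rows - cols)
--                 candidate = (aspect_penalty, area, rows, cols)
--                 if best is None or candidate < best: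
--                     best = candidate
--
--     assert best is not None
--     return best[2], best[3]
-- ===== SOURCE B (Python) =====
-- import math
--
-- def choose_grid(n_photos: int, reserved_cells: int):
--     needed = n_photos + reserved_cells
--     if needed <= 1:
--         return (1, 1)
--     s = math.isqrt(needed - 1) + 1
--     return (s, s)
-- ===== Notes on version B (the rewrite author's own statement) =====
-- stated objective: simpler
-- what changed: Replaces the 21x21 brute-force candidate search (441 lexicographic comparisons) with a closed-form answer: the winner is always the smallest square side s with s*s >= needed, computed directly via math.isqrt.
import Mathlib
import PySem

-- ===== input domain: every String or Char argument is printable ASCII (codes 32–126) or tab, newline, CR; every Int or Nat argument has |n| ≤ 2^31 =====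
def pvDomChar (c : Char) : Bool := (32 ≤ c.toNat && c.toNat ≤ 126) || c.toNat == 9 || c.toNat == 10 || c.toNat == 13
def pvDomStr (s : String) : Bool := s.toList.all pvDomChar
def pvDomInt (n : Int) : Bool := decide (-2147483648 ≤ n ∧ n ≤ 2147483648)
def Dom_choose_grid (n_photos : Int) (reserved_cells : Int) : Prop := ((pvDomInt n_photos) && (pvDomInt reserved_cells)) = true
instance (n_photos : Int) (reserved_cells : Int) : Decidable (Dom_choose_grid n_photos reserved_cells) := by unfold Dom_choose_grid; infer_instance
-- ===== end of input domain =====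

-- B replaces A's 441-candidate window search with the closed-form minimal square side (simpler);
-- A raises ValueError on negative needed, which Pre_ excludes.

-- ===== PORT A =====

-- int(math.ceil(math.sqrt(needed))): the double sqrt is correctly rounded, so for 0 ≤ needed ≤ 2^33
-- (all of Dom) its ceiling equals the exact integer ceiling of the square root, computed here exactly.
-- (needed < 0, where math.sqrt raises ValueError, is excluded by Pre_choose_grid.)
def pyCeilSqrtF (needed : Int) : Int :=
  if needed ≤ 0 then 0 else ((needed - 1).toNat.sqrt : Int) + 1

-- Python tuple '<' on 4-tuples of ints (lexicographic)
def candLt (c d : Int × Int × Int × Int) : Bool :=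
  decide (c.1 < d.1) ||
    (c.1 == d.1 && (decide (c.2.1 < d.2.1) ||
      (c.2.1 == d.2.1 && (decide (c.2.2.1 < d.2.2.1) ||
        (c.2.2.1 == d.2.2.1 && decide (c.2.2.2 < d.2.2.2))))))

-- loop body: one (rows, cols) candidate
def stepA (needed : Int) (best : Option (Int × Int × Int × Int)) (rows cols : Int) :
    Option (Int × Int × Int × Int) :=
  if rows * cols ≥ needed then
    let area := rows * cols
    let aspect_penalty := |rows - cols|
    let candidate := (aspect_penalty, area, rows, cols)
    match best with
    | none => some candidate
    | some b => if candLt candidate b then some candidate else some b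
  else best

def choose_grid (n_photos : Int) (reserved_cells : Int) : Int × Int :=
  let needed := n_photos + reserved_cells
  let side := pyCeilSqrtF needed
  let best :=
    (PySem.List.pyRange (max 1 (side - 10)) (side + 11) 1).foldl
      (fun best rows =>
        (PySem.List.pyRange (max 1 (side - 10)) (side + 11) 1).foldl
          (fun best cols => stepA needed best rows cols) best)
      none
  match best with
  | some b => (b.2.2.1, b.2.2.2)
  | none => (0, 0)  -- 'assert best is not None': unreachable under Pre_choose_grid

-- ===== PORT B =====

def choose_grid_alt (n_photos : Int) (reserved_cells : Int) : Int × Int :=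
  let needed := n_photos + reserved_cells
  if needed ≤ 1 then (1, 1)
  else
    -- math.isqrt(needed - 1) + 1
    let s : Int := ((needed - 1).toNat.sqrt : Int) + 1
    (s, s)

-- ===== PRECONDITION & SPEC =====
-- Pre_ excludes exactly the inputs where A raises (math.sqrt of a negative number).
def Pre_choose_grid (n_photos : Int) (reserved_cells : Int) : Prop := 0 ≤ n_photos + reserved_cells
instance (n_photos : Int) (reserved_cells : Int) : Decidable (Pre_choose_grid n_photos reserved_cells) := by
  unfold Pre_choose_grid; infer_instance

def pvWitness_choose_grid : Int × Int := (3, 2)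

def Spec_choose_grid (n_photos : Int) (reserved_cells : Int) (out : Int × Int) : Prop := out = choose_grid_alt n_photos reserved_cells
instance (n_photos : Int) (reserved_cells : Int) (out : Int × Int) : Decidable (Spec_choose_grid n_photos reserved_cells out) := by unfold Spec_choose_grid; infer_instance

-- ===== CLAIM (what is proved, stated in full; the proofs are below) =====
def Claim_equal_choose_grid : Prop := ∀ (n_photos : Int) (reserved_cells : Int), Dom_choose_grid n_photos reserved_cells → Pre_choose_grid n_photos reserved_cells → Spec_choose_grid n_photos reserved_cells (choose_grid n_photos reserved_cells)

-- ===== LEMMAS AND PROOFS =====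

-- candLt on explicit 4-tuples, as a proposition (Python's lexicographic tuple '<')
theorem candLt_quad (a1 a2 a3 a4 b1 b2 b3 b4 : Int) :
    candLt (a1, a2, a3, a4) (b1, b2, b3, b4) = true ↔
      (a1 < b1 ∨ (a1 = b1 ∧ (a2 < b2 ∨ (a2 = b2 ∧ (a3 < b3 ∨ (a3 = b3 ∧ a4 < b4)))))) := by
  simp [candLt]

theorem candLt_irrefl (c : Int × Int × Int × Int) : candLt c c = false := by
  simp [candLt]

-- unfolding lemmas for one step of A's loop body
theorem stepA_invalid (needed r c : Int) (acc : Option (Int × Int × Int × Int))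
    (h : ¬ needed ≤ r * c) : stepA needed acc r c = acc := by
  unfold stepA; rw [if_neg (by omega)]

theorem stepA_none (needed r c : Int) (h : needed ≤ r * c) :
    stepA needed none r c = some (|r - c|, r * c, r, c) := by
  unfold stepA; rw [if_pos (by omega)]

theorem stepA_some_lt (needed r c : Int) (b : Int × Int × Int × Int) (h : needed ≤ r * c)
    (hlt : candLt (|r - c|, r * c, r, c) b = true) :
    stepA needed (some b) r c = some (|r - c|, r * c, r, c) := by
  unfold stepA; rw [if_pos (by omega)]; simp [hlt]

theorem stepA_some_ge (needed r c : Int) (b : Int × Int × Int × Int) (h : needed ≤ r * c)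
    (hge : candLt (|r - c|, r * c, r, c) b = false) :
    stepA needed (some b) r c = some b := by
  unfold stepA; rw [if_pos (by omega)]; simp [hge]

-- flatten the nested fold over the two ranges into one fold over the pair list
theorem foldl_nested_flatten (l1 l2 : List Int)
    (g : Option (Int × Int × Int × Int) → Int → Int → Option (Int × Int × Int × Int))
    (init : Option (Int × Int × Int × Int)) :
    l1.foldl (fun b r => l2.foldl (fun b c => g b r c) b) init
      = (l1.flatMap (fun r => l2.map (fun c => (r, c)))).foldl (fun b p => g b p.1 p.2) init := by
  induction l1 generalizing init with
  | nil => simp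
  | cons r l1 ih => simp [List.foldl_append, List.foldl_map, ih]

def goodAcc (t : Int × Int × Int × Int) (acc : Option (Int × Int × Int × Int)) : Prop :=
  acc = none ∨ ∃ b, acc = some b ∧ candLt t b = true

-- the fold reaches the strict minimum t = (0, s*s, s, s) and keeps it
theorem foldl_reach (needed s : Int) (t : Int × Int × Int × Int) (ht : t = (0, s * s, s, s))
    (hsv : needed ≤ s * s)
    (l : List (Int × Int)) (acc : Option (Int × Int × Int × Int))
    (H : ∀ p ∈ l, needed ≤ p.1 * p.2 →
        ((|p.1 - p.2|, p.1 * p.2, p.1, p.2) = t ∨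
         (candLt t (|p.1 - p.2|, p.1 * p.2, p.1, p.2) = true ∧
          candLt (|p.1 - p.2|, p.1 * p.2, p.1, p.2) t = false)))
    (hin : ((s, s) ∈ l ∧ goodAcc t acc) ∨ acc = some t) :
    l.foldl (fun b p => stepA needed b p.1 p.2) acc = some t := by
  induction l generalizing acc with
  | nil =>
    rcases hin with ⟨h1, _⟩ | h2
    · simp at h1
    · simpa using h2
  | cons p l ih =>
    have Hp := H p (List.mem_cons_self ..)
    have Hl : ∀ q ∈ l, needed ≤ q.1 * q.2 →
        ((|q.1 - q.2|, q.1 * q.2, q.1, q.2) = t ∨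
         (candLt t (|q.1 - q.2|, q.1 * q.2, q.1, q.2) = true ∧
          candLt (|q.1 - q.2|, q.1 * q.2, q.1, q.2) t = false)) :=
      fun q hq => H q (List.mem_cons_of_mem _ hq)
    simp only [List.foldl_cons]
    rcases hin with ⟨hmem, hgood⟩ | hacc
    · rcases List.mem_cons.mp hmem with hps | hmem'
      · -- p = (s, s): the minimum enters the accumulator now
        have hcand : (|p.1 - p.2|, p.1 * p.2, p.1, p.2) = t := by
          rw [ht, ← hps]; simp
        have hvalid : needed ≤ p.1 * p.2 := by rw [← hps]; simpa using hsv
        have hstep : stepA needed acc p.1 p.2 = some t := by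
          rcases hgood with rfl | ⟨b, rfl, hb⟩
          · rw [stepA_none _ _ _ hvalid, hcand]
          · rw [stepA_some_lt _ _ _ _ hvalid (by rw [hcand]; exact hb), hcand]
        rw [hstep]
        exact ih _ Hl (Or.inr rfl)
      · -- (s, s) still ahead: the accumulator stays good or becomes t
        by_cases hv : needed ≤ p.1 * p.2
        · rcases Hp hv with hct | ⟨h1, _⟩
          · -- this candidate already equals t
            rcases hgood with rfl | ⟨b, rfl, hb⟩
            · rw [stepA_none _ _ _ hv, hct]; exact ih _ Hl (Or.inr rfl)
            · rw [stepA_some_lt _ _ _ _ hv (by rw [hct]; exact hb), hct]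
              exact ih _ Hl (Or.inr rfl)
          · -- strictly worse than t: accumulator stays good
            have hstep : goodAcc t (stepA needed acc p.1 p.2) := by
              rcases hgood with rfl | ⟨b, rfl, hb⟩
              · rw [stepA_none _ _ _ hv]; exact Or.inr ⟨_, rfl, h1⟩
              · rcases Bool.eq_false_or_eq_true (candLt (|p.1 - p.2|, p.1 * p.2, p.1, p.2) b)
                    with hlt | hlt
                · rw [stepA_some_lt _ _ _ _ hv hlt]; exact Or.inr ⟨_, rfl, h1⟩
                · rw [stepA_some_ge _ _ _ _ hv hlt]; exact Or.inr ⟨b, rfl, hb⟩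
            exact ih _ Hl (Or.inl ⟨hmem', hstep⟩)
        · rw [stepA_invalid _ _ _ _ hv]
          exact ih _ Hl (Or.inl ⟨hmem', hgood⟩)
    · -- accumulator already holds t
      have hstep : stepA needed (some t) p.1 p.2 = some t := by
        by_cases hv : needed ≤ p.1 * p.2
        · rcases Hp hv with hct | ⟨_, h2⟩
          · rw [stepA_some_ge _ _ _ _ hv (by rw [hct]; exact candLt_irrefl t)]
          · rw [stepA_some_ge _ _ _ _ hv h2]
        · rw [stepA_invalid _ _ _ _ hv]
      rw [hacc, hstep]
      exact ih _ Hl (Or.inr rfl)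

-- the square (s, s) beats every other valid candidate in the window
theorem cand_strict (needed s r c : Int) (hs : 1 ≤ s) (hr : 1 ≤ r) (hc : 1 ≤ c)
    (hmin : ∀ k, 1 ≤ k → k < s → k * k < needed) (hv : needed ≤ r * c)
    (hne : ¬(r = s ∧ c = s)) :
    candLt (0, s * s, s, s) (|r - c|, r * c, r, c) = true ∧
    candLt (|r - c|, r * c, r, c) (0, s * s, s, s) = false := by
  rcases eq_or_ne r c with rfl | hrc
  · -- a square r×r with r ≠ s: strictly larger area
    have habs : |r - r| = (0 : Int) := by simp
    have hrs : s < r := by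
      rcases lt_trichotomy r s with h2 | h2 | h2
      · exact absurd hv (not_le.mpr (hmin r hr h2))
      · exact absurd ⟨h2, h2⟩ hne
      · exact h2
    have harea : s * s < r * r := by nlinarith
    rw [habs]
    refine ⟨?_, ?_⟩
    · rw [candLt_quad]; exact Or.inr ⟨rfl, Or.inl harea⟩
    · rw [Bool.eq_false_iff, ne_eq, candLt_quad]
      rintro (h | ⟨-, h | ⟨-, h | ⟨h, -⟩⟩⟩)
      · exact lt_irrefl 0 h
      · exact absurd h (not_lt.mpr harea.le)
      · exact absurd h (by omega)
      · exact absurd h (by omega)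
  · -- a non-square: positive aspect penalty
    have habs : 0 < |r - c| := abs_pos.mpr (sub_ne_zero.mpr hrc)
    refine ⟨?_, ?_⟩
    · rw [candLt_quad]; exact Or.inl habs
    · rw [Bool.eq_false_iff, ne_eq, candLt_quad]
      rintro (h | ⟨h, -⟩)
      · exact absurd h (by omega)
      · exact absurd h (by omega)

-- the core equation: A's window search returns the minimal valid square (B's closed form)
theorem grid_core (needed : Int) (hpre : 0 ≤ needed) :
    (match (PySem.List.pyRange (max 1 (pyCeilSqrtF needed - 10)) (pyCeilSqrtF needed + 11) 1).foldl
        (fun best rows =>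
          (PySem.List.pyRange (max 1 (pyCeilSqrtF needed - 10)) (pyCeilSqrtF needed + 11) 1).foldl
            (fun best cols => stepA needed best rows cols) best)
        none with
     | some b => (b.2.2.1, b.2.2.2)
     | none => ((0 : Int), (0 : Int)))
    = (if needed ≤ 1 then ((1 : Int), (1 : Int))
       else (((needed - 1).toNat.sqrt : Int) + 1, ((needed - 1).toNat.sqrt : Int) + 1)) := by
  set s : Int := if needed ≤ 1 then 1 else ((needed - 1).toNat.sqrt : Int) + 1 with hsdef
  have hq0 : (0 : Int) ≤ ((needed - 1).toNat.sqrt : Int) := Int.natCast_nonneg _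
  have hs1 : 1 ≤ s := by rw [hsdef]; split <;> omega
  have hcast : (1 : Int) < needed → ((needed - 1).toNat : Int) = needed - 1 := fun h => by omega
  have hsv : needed ≤ s * s := by
    rw [hsdef]; split
    · nlinarith
    · have h2 : 1 < needed := by omega
      have h3 : ((needed - 1).toNat : Int) <
          (((needed - 1).toNat.sqrt : Int) + 1) * (((needed - 1).toNat.sqrt : Int) + 1) := by
        exact_mod_cast Nat.lt_succ_sqrt (needed - 1).toNat
      rw [hcast h2] at h3; omega
  have hmin : ∀ k, 1 ≤ k → k < s → k * k < needed := by
    intro k hk1 hks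
    rw [hsdef] at hks
    by_cases h1 : needed ≤ 1
    · rw [if_pos h1] at hks; omega
    · rw [if_neg h1] at hks
      have h2 : 1 < needed := by omega
      have hle : ((needed - 1).toNat.sqrt : Int) * ((needed - 1).toNat.sqrt : Int) ≤
          ((needed - 1).toNat : Int) := by exact_mod_cast Nat.sqrt_le (needed - 1).toNat
      rw [hcast h2] at hle
      have hkq : k ≤ ((needed - 1).toNat.sqrt : Int) := by omega
      nlinarith
  have hwin : max 1 (pyCeilSqrtF needed - 10) ≤ s ∧ s < pyCeilSqrtF needed + 11 := by
    unfold pyCeilSqrtF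
    rw [hsdef]
    by_cases h0 : needed ≤ 0
    · rw [if_pos h0, if_pos (by omega)]; omega
    · rw [if_neg h0]
      by_cases h1 : needed ≤ 1
      · have he : (needed - 1).toNat = 0 := by omega
        rw [if_pos h1, he, Nat.sqrt_zero]; simp
      · rw [if_neg h1]; omega
  rw [foldl_nested_flatten]
  have hmemP : ∀ p : Int × Int,
      p ∈ (PySem.List.pyRange (max 1 (pyCeilSqrtF needed - 10)) (pyCeilSqrtF needed + 11) 1).flatMap
          (fun r => (PySem.List.pyRange (max 1 (pyCeilSqrtF needed - 10))
            (pyCeilSqrtF needed + 11) 1).map (fun c => (r, c))) →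
        1 ≤ p.1 ∧ 1 ≤ p.2 := by
    intro p hp
    rcases List.mem_flatMap.mp hp with ⟨a, ha, hpa⟩
    rcases List.mem_map.mp hpa with ⟨b, hb, rfl⟩
    rw [PySem.List.mem_pyRange_one] at ha hb
    constructor <;> simp <;> omega
  have hsP : ((s, s) : Int × Int) ∈
      (PySem.List.pyRange (max 1 (pyCeilSqrtF needed - 10)) (pyCeilSqrtF needed + 11) 1).flatMap
        (fun r => (PySem.List.pyRange (max 1 (pyCeilSqrtF needed - 10))
          (pyCeilSqrtF needed + 11) 1).map (fun c => (r, c))) := by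
    refine List.mem_flatMap.mpr ⟨s, ?_, List.mem_map.mpr ⟨s, ?_, rfl⟩⟩ <;>
      rw [PySem.List.mem_pyRange_one] <;> exact ⟨hwin.1, hwin.2⟩
  rw [foldl_reach needed s (0, s * s, s, s) rfl hsv _ none ?_ (Or.inl ⟨hsP, Or.inl rfl⟩)]
  · dsimp only
    by_cases h1 : needed ≤ 1 <;> simp [h1, hsdef]
  · intro p hp hv
    obtain ⟨h1, h3⟩ := hmemP p hp
    by_cases heq : p.1 = s ∧ p.2 = s
    · left; rw [heq.1, heq.2]; simp
    · right
      exact cand_strict needed s p.1 p.2 hs1 h1 h3 hmin hv heq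

-- ===== VERDICT (by name: the statement is the Claim_ definition above) =====
theorem choose_grid_spec : Claim_equal_choose_grid := by
  intro n r _ hpre
  unfold Pre_choose_grid at hpre
  unfold Spec_choose_grid
  exact grid_core (n + r) hpre
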